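-- pv_equiv track=rewrite | github.com/Charlie-Steer/taskdown | main.py | get_block_lengths
-- ===== SOURCE A (Python) =====
-- def get_block_lengths(lines: str):
--     block_lenghts = []
--     task_line_count: int = 1
--
--     for i, line in enumerate(lines):
--         if line.startswith('-'):
--             for j in range(len(lines) - i):
--                 if (i + j + 1) < len(lines) and not lines[i + j + 1].startswith('-'):
--                     j += 1
--                     task_line_count += 1
--                 else:
--                     block_lenghts.append(task_line_count)
--                     task_line_count = 1
--                     break
--     return block_lenghts
-- ===== SOURCE B (Python) =====
-- def get_block_lengths(lines):
--     block_lengths = []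
--     count = None  # None = no open block; else lines counted in current block
--     for line in lines:
--         if line.startswith('-'):
--             if count is not None:
--                 block_lengths.append(count)
--             count = 1
--         elif count is not None:
--             count += 1
--     if count is not None:
--         block_lengths.append(count)
--     return block_lengths
-- ===== Notes on version B (the rewrite author's own statement) =====
-- stated objective: simpler
-- what changed: Replaces the indexed outer loop plus per-dash inner forward scan (with len() checks and random-access indexing) by a single pass over the lines that keeps one running counter for the currently open block and flushes it when a new dash line or the end is reached.
import Mathlib
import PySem

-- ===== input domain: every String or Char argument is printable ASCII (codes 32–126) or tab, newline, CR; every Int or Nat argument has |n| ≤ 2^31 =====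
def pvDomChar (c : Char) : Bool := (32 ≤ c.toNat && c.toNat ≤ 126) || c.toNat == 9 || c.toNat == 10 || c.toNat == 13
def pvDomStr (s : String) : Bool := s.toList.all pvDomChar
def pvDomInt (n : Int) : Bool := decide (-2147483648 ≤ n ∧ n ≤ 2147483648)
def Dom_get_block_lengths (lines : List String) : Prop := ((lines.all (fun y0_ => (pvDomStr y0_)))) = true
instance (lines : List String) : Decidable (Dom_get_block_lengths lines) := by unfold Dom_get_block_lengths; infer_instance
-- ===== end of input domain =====

-- B replaces A's indexed outer loop + per-dash inner forward scan by one pass with a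
-- running counter for the open block (objective: simpler; same return value everywhere).

-- ===== PORT A =====
-- inner 'for j in range(len(lines) - i): …' with its break: recursion over the j-list,
-- returning the updated (block_lengths, task_line_count); break = stop consuming js.
def pvInnerA (lines : List String) (i : Int) (js : List Int)
    (acc : List Int) (cnt : Int) : List Int × Int :=
  match js with
  | [] => (acc, cnt)
  | j :: rest =>
    if i + j + 1 < (lines.length : Int) ∧
       ¬ (PySem.Str.startswith ((PySem.List.pyGet? lines (i + j + 1)).getD "") "-") = true then
      pvInnerA lines i rest acc (cnt + 1)
    else
      (acc ++ [cnt], 1)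

-- outer 'for i, line in enumerate(lines)': recursion over the enumerate pairs with state
def pvOuterA (lines : List String) (pairs : List (Int × String))
    (acc : List Int) (cnt : Int) : List Int × Int :=
  match pairs with
  | [] => (acc, cnt)
  | (i, line) :: rest =>
    if PySem.Str.startswith line "-" then
      let r := pvInnerA lines i (PySem.List.pyRange 0 ((lines.length : Int) - i) 1) acc cnt
      pvOuterA lines rest r.1 r.2
    else
      pvOuterA lines rest acc cnt

def get_block_lengths (lines : List String) : List Int :=
  (pvOuterA lines (PySem.List.enumerate lines) [] 1).1

-- ===== PORT B =====
-- single pass: Option Int counter for the currently open block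
def pvLoopB (ls : List String) (acc : List Int) (cnt : Option Int) : List Int × Option Int :=
  match ls with
  | [] => (acc, cnt)
  | l :: rest =>
    if PySem.Str.startswith l "-" then
      pvLoopB rest (match cnt with | some c => acc ++ [c] | none => acc) (some 1)
    else
      match cnt with
      | some c => pvLoopB rest acc (some (c + 1))
      | none => pvLoopB rest acc none

def get_block_lengths_alt (lines : List String) : List Int :=
  let r := pvLoopB lines [] none
  match r.2 with
  | some c => r.1 ++ [c]
  | none => r.1

-- ===== PRECONDITION & SPEC =====
def Spec_get_block_lengths (lines : List String) (out : List Int) : Prop := out = get_block_lengths_alt lines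
instance (lines : List String) (out : List Int) : Decidable (Spec_get_block_lengths lines out) := by unfold Spec_get_block_lengths; infer_instance

-- ===== CLAIM (what is proved, stated in full; the proofs are below) =====
def Claim_equal_get_block_lengths : Prop := ∀ (lines : List String), Dom_get_block_lengths lines → Spec_get_block_lengths lines (get_block_lengths lines)

-- ===== LEMMAS AND PROOFS =====

-- common intermediate form: pvGo ls none = blocks of ls, pvGo ls (some c) = same inside an open block of count c
def pvDash (l : String) : Bool := PySem.Str.startswith l "-"

def pvGo : List String → Option Int → List Int
  | [], none => []
  | [], some c => [c]
  | l :: rest, none => if pvDash l then pvGo rest (some 1) else pvGo rest none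
  | l :: rest, some c => if pvDash l then c :: pvGo rest (some 1) else pvGo rest (some (c + 1))

def pvRun (ls : List String) : Int :=
  ((ls.takeWhile (fun l => !pvDash l)).length : Int)

-- B side --------------------------------------------------------------------

lemma pvLoopB_spec (ls : List String) : ∀ (acc : List Int) (cnt : Option Int),
    (match (pvLoopB ls acc cnt).2 with
      | some c => (pvLoopB ls acc cnt).1 ++ [c]
      | none => (pvLoopB ls acc cnt).1) = acc ++ pvGo ls cnt := by
  induction ls with
  | nil =>
    intro acc cnt
    cases cnt <;> simp [pvLoopB, pvGo]
  | cons l rest ih =>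
    intro acc cnt
    cases hd : PySem.Chars.startswith l.toList ['-'] with
    | false =>
      cases cnt with
      | none => simpa [pvLoopB, pvGo, pvDash, hd] using ih acc none
      | some c => simpa [pvLoopB, pvGo, pvDash, hd] using ih acc (some (c + 1))
    | true =>
      cases cnt with
      | none => simpa [pvLoopB, pvGo, pvDash, hd] using ih acc (some 1)
      | some c => simpa [pvLoopB, pvGo, pvDash, hd] using ih (acc ++ [c]) (some 1)

lemma alt_eq_pvGo (lines : List String) : get_block_lengths_alt lines = pvGo lines none := by
  simpa [get_block_lengths_alt] using pvLoopB_spec lines [] none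

-- A side --------------------------------------------------------------------

-- inside a block with count c: emit c + (length of the non-dash run), then the rest
lemma pvGo_some (ls : List String) : ∀ c : Int,
    pvGo ls (some c) = (c + pvRun ls) :: pvGo (ls.dropWhile (fun l => !pvDash l)) none := by
  induction ls with
  | nil => intro c; simp [pvGo, pvRun]
  | cons l rest ih =>
    intro c
    by_cases hd : pvDash l = true
    · rw [show pvGo (l :: rest) (some c) = c :: pvGo rest (some 1) from by simp [pvGo, hd],
        List.dropWhile_cons_of_neg (by simp [hd])]
      have hrun : pvRun (l :: rest) = 0 := by
        unfold pvRun
        rw [List.takeWhile_cons_of_neg (by simp [hd])]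
        simp
      rw [hrun]
      simp [pvGo, hd]
    · have hd' : pvDash l = false := by simpa using hd
      have hrun : pvRun (l :: rest) = 1 + pvRun rest := by
        unfold pvRun
        rw [List.takeWhile_cons_of_pos (by simp [hd'])]
        simp only [List.length_cons]
        push_cast
        ring
      rw [show pvGo (l :: rest) (some c) = pvGo rest (some (c + 1)) from by simp [pvGo, hd'],
        ih (c + 1), List.dropWhile_cons_of_pos (by simp [hd']), hrun]
      congr 1
      ring

lemma pvGo_dropWhile (ls : List String) :
    pvGo (ls.dropWhile (fun l => !pvDash l)) none = pvGo ls none := by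
  induction ls with
  | nil => simp
  | cons l rest ih =>
    by_cases hd : pvDash l = true
    · rw [List.dropWhile_cons_of_neg (by simp [hd])]
    · have hd' : pvDash l = false := by simpa using hd
      rw [List.dropWhile_cons_of_pos (by simp [hd']), ih]
      simp [pvGo, hd']

-- inner loop: starting at offset j past position i, it returns (acc ++ [cnt + run], 1)
lemma pvInnerA_eq (lines : List String) (i j : Nat) (hij : i + j < lines.length)
    (acc : List Int) (cnt : Int) :
    pvInnerA lines (i : Int) (PySem.List.pyRange (j : Int) ((lines.length : Int) - (i : Int)) 1) acc cnt =
      (acc ++ [cnt + pvRun (lines.drop (i + j + 1))], 1) := by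
  have hlt : (j : Int) < (lines.length : Int) - (i : Int) := by omega
  rw [PySem.List.pyRange_one_cons hlt]
  simp only [pvInnerA]
  by_cases hend : i + j + 1 < lines.length
  · have hidx : PySem.List.pyGet? lines ((i : Int) + (j : Int) + 1) =
        some lines[i + j + 1] := by
      have hc : ((i : Int) + (j : Int) + 1) = ((i + j + 1 : Nat) : Int) := by push_cast; ring
      rw [hc, PySem.List.pyGet?_natCast]
      simp [List.getElem?_eq_getElem hend]
    have hdrop : lines.drop (i + j + 1) = lines[i + j + 1] :: lines.drop (i + j + 2) :=
      List.drop_eq_getElem_cons hend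
    rw [hidx]
    simp only [Option.getD_some]
    by_cases hd : pvDash lines[i + j + 1] = true
    · rw [if_neg (fun h => h.2 hd)]
      have hrun : pvRun (lines.drop (i + j + 1)) = 0 := by
        rw [hdrop]
        unfold pvRun
        rw [List.takeWhile_cons_of_neg (by simp [hd])]
        simp
      rw [hrun]
      simp
    · have hd' : pvDash lines[i + j + 1] = false := by simpa using hd
      rw [if_pos ⟨by omega, hd⟩]
      have hcast : ((j : Int) + 1) = ((j + 1 : Nat) : Int) := by push_cast; ring
      rw [hcast, pvInnerA_eq lines i (j + 1) (by omega) acc (cnt + 1)]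
      have hrun : pvRun (lines.drop (i + j + 1)) = 1 + pvRun (lines.drop (i + j + 2)) := by
        rw [hdrop]
        unfold pvRun
        rw [List.takeWhile_cons_of_pos (by simp [hd'])]
        simp only [List.length_cons]
        push_cast
        ring
      have hn : i + (j + 1) + 1 = i + j + 2 := by omega
      rw [hn, hrun]
      have : cnt + 1 + pvRun (lines.drop (i + j + 2)) =
          cnt + (1 + pvRun (lines.drop (i + j + 2))) := by ring
      rw [this]
  · rw [if_neg (fun h => absurd h.1 (by omega))]
    have hnil : lines.drop (i + j + 1) = [] := List.drop_eq_nil_iff.mpr (by omega)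
    rw [hnil]
    simp [pvRun]
termination_by lines.length - (i + j)
decreasing_by omega

-- outer loop over the enumerate suffix starting at index i
lemma pvOuterA_eq (lines : List String) : ∀ (suffix : List String) (i : Nat),
    lines.drop i = suffix → ∀ (acc : List Int),
    pvOuterA lines (PySem.List.enumerate suffix (i : Int)) acc 1 = (acc ++ pvGo suffix none, 1) := by
  intro suffix
  induction suffix with
  | nil => intro i _ acc; simp [pvOuterA, PySem.List.enumerate_nil, pvGo]
  | cons l rest ih =>
    intro i hsuf acc
    have hi : i < lines.length := by
      by_contra h
      have h0 : lines.drop i = [] := List.drop_eq_nil_iff.mpr (by omega)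
      rw [h0] at hsuf
      simp at hsuf
    have hchain := (List.drop_eq_getElem_cons hi).symm.trans hsuf
    injection hchain with hl hrest
    rw [PySem.List.enumerate_cons]
    have hcast : ((i : Int) + 1) = ((i + 1 : Nat) : Int) := by push_cast; ring
    by_cases hd : pvDash l = true
    · simp only [pvOuterA]
      rw [if_pos (show PySem.Str.startswith l "-" = true from hd)]
      have hinner := pvInnerA_eq lines i 0 (by omega) acc 1
      simp only [Nat.cast_zero, Nat.add_zero] at hinner
      rw [hinner]
      rw [hcast, ih (i + 1) hrest _]
      have hrhs : pvGo (l :: rest) none = (1 + pvRun rest) :: pvGo rest none := by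
        rw [show pvGo (l :: rest) none = pvGo rest (some 1) from by simp [pvGo, hd],
          pvGo_some rest 1, pvGo_dropWhile rest]
      rw [hrhs, hrest]
      simp
    · have hd' : pvDash l = false := by simpa using hd
      simp only [pvOuterA]
      rw [if_neg (show ¬ PySem.Str.startswith l "-" = true from hd)]
      rw [hcast, ih (i + 1) hrest acc]
      simp [pvGo, hd']

lemma a_eq_pvGo (lines : List String) : get_block_lengths lines = pvGo lines none := by
  have h := pvOuterA_eq lines lines 0 (by simp) []
  simp only [Nat.cast_zero] at h
  simp [get_block_lengths, h]

-- ===== VERDICT (by name: the statement is the Claim_ definition above) =====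
theorem get_block_lengths_spec : Claim_equal_get_block_lengths := by
  intro lines _
  unfold Spec_get_block_lengths
  rw [a_eq_pvGo, alt_eq_pvGo]
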